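-- pv_equiv track=rewrite | github.com/ameliekoch/cyberaka | christofides.py | insertnodestour
-- ===== SOURCE A (Python) =====
-- def insertnodestour(tour, newtour, u):
--     rettour1 = []
--     rettour2 = []
--     onetwo = True
--     for node in tour:
--         if node != u and onetwo:
--             rettour1.append(node)
--         elif node == u and onetwo:
--             onetwo = False
--         else:
--             rettour2.append(node)
--
--     for node in newtour:
--         rettour1.append(node)
--     for node in rettour2:
--         rettour1.append(node)
--     return rettour1
-- ===== SOURCE B (Python) =====
-- def insertnodestour(tour, newtour, u):
--     try:
--         i = tour.index(u)
--     except ValueError: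
--         return list(tour) + list(newtour)
--     return tour[:i] + list(newtour) + tour[i+1:]
-- ===== Notes on version B (the rewrite author's own statement) =====
-- stated objective: idiomatic
-- what changed: Replaces the flag-and-two-accumulators single pass with a direct tour.index(u) lookup plus slice concatenation (try/except for the absent-u fallthrough).
import Mathlib
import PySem

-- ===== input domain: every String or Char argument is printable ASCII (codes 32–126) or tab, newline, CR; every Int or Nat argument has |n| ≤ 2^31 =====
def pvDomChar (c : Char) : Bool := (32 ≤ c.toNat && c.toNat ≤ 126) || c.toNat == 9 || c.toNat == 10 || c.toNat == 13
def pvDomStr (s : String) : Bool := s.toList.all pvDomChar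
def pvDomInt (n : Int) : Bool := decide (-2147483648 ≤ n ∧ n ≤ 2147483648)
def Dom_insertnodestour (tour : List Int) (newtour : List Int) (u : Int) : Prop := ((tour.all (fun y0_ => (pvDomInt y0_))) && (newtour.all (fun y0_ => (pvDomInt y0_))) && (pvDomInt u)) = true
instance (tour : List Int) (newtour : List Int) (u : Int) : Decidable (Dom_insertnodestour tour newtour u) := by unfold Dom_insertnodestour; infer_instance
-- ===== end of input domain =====

-- ===== PORT A =====
-- B replaces A's flag-and-two-accumulators pass with index lookup + slice concatenation (idiomatic; same cost).
def insStep (u : Int) (st : List Int × List Int × Bool) (node : Int) : List Int × List Int × Bool :=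
  if node ≠ u ∧ st.2.2 then (st.1 ++ [node], st.2.1, st.2.2)
  else if node = u ∧ st.2.2 then (st.1, st.2.1, false)
  else (st.1, st.2.1 ++ [node], st.2.2)

def insertnodestour (tour : List Int) (newtour : List Int) (u : Int) : List Int :=
  let s := tour.foldl (insStep u) ([], [], true)
  let r1 := newtour.foldl (fun acc node => acc ++ [node]) s.1
  s.2.1.foldl (fun acc node => acc ++ [node]) r1

-- ===== PORT B =====
def insertnodestour_alt (tour : List Int) (newtour : List Int) (u : Int) : List Int :=
  match PySem.List.index? tour u with
  | none => tour ++ newtour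
  | some i =>
      PySem.List.slice tour none (some (i : Int)) ++ newtour
        ++ PySem.List.slice tour (some ((i : Int) + 1)) none

-- ===== PRECONDITION & SPEC =====
def Spec_insertnodestour (tour : List Int) (newtour : List Int) (u : Int) (out : List Int) : Prop := out = insertnodestour_alt tour newtour u
instance (tour : List Int) (newtour : List Int) (u : Int) (out : List Int) : Decidable (Spec_insertnodestour tour newtour u out) := by unfold Spec_insertnodestour; infer_instance

-- ===== CLAIM (what is proved, stated in full; the proofs are below) =====
def Claim_equal_insertnodestour : Prop := ∀ (tour : List Int) (newtour : List Int) (u : Int), Dom_insertnodestour tour newtour u → Spec_insertnodestour tour newtour u (insertnodestour tour newtour u)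

-- ===== LEMMAS AND PROOFS =====

lemma foldl_append_eq (xs acc : List Int) :
    xs.foldl (fun acc node => acc ++ [node]) acc = acc ++ xs := by
  induction xs generalizing acc with
  | nil => simp
  | cons x t ih => simp [List.foldl, ih, List.append_assoc]

lemma loop_false (tour r1 r2 : List Int) (u : Int) :
    tour.foldl (insStep u) (r1, r2, false) = (r1, r2 ++ tour, false) := by
  induction tour generalizing r2 with
  | nil => simp
  | cons x t ih => simp [List.foldl, insStep, ih, List.append_assoc]

lemma loop_true (tour r1 r2 : List Int) (u : Int) :
    tour.foldl (insStep u) (r1, r2, true) =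
      match PySem.List.index? tour u with
      | none => (r1 ++ tour, r2, true)
      | some i => (r1 ++ tour.take i, r2 ++ tour.drop (i + 1), false) := by
  induction tour generalizing r1 with
  | nil => simp [PySem.List.index?]
  | cons x t ih =>
    by_cases hx : x = u
    · subst hx
      rw [PySem.List.index?_cons_self]
      have h1 : insStep x (r1, r2, true) x = (r1, r2, false) := by simp [insStep]
      simp only [List.foldl_cons, h1, loop_false]
      simp
    · rw [PySem.List.index?_cons_of_ne _ hx]
      have hstep : List.foldl (insStep u) (r1, r2, true) (x :: t)
          = List.foldl (insStep u) (r1 ++ [x], r2, true) t := by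
        have h1 : insStep u (r1, r2, true) x = (r1 ++ [x], r2, true) := by simp [insStep, hx]
        simp only [List.foldl_cons, h1]
      rw [hstep, ih]
      cases h : PySem.List.index? t u with
      | none => simp [List.append_assoc]
      | some i => simp [List.append_assoc]

lemma slice_take (tour : List Int) (i : Nat) :
    PySem.List.slice tour none (some (i : Int)) = tour.take i :=
  PySem.List.slice_to_natCast tour i

lemma slice_drop (tour : List Int) (i : Nat) :
    PySem.List.slice tour (some ((i : Int) + 1)) none = tour.drop (i + 1) := by
  have := PySem.List.slice_from_natCast tour (i + 1)
  simpa using this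

-- ===== VERDICT (by name: the statement is the Claim_ definition above) =====
theorem insertnodestour_spec : Claim_equal_insertnodestour := by
  intro tour newtour u _
  unfold Spec_insertnodestour insertnodestour insertnodestour_alt
  rw [loop_true]
  cases h : PySem.List.index? tour u with
  | none =>
      show List.foldl _ (List.foldl _ (tour) newtour) [] = _
      rw [List.foldl_nil, foldl_append_eq]
  | some i =>
      show List.foldl _ (List.foldl _ (tour.take i) newtour) (tour.drop (i + 1)) = _
      rw [foldl_append_eq, foldl_append_eq]
      simp only [slice_take, slice_drop, List.append_assoc]
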